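-- pv_equiv track=rewrite | github.com/erikw/advent-of-code-solutions | 2023/11/part2.py | expand_rows
-- ===== SOURCE A (Python) =====
-- from collections import defaultdict
--
-- SPACE_EXPANSION = 1000000 - 1
--
-- def expand_rows(univ_rows, galaxies):
--     galaxies_by_row = defaultdict(list)
--     for row, col in galaxies:
--         galaxies_by_row[row].append(col)
--
--     galaxies_expanded = []
--     row = 0
--     rows_expanded = 0
--     while row < univ_rows:
--         if row in galaxies_by_row:
--             for col in galaxies_by_row[row]:
--                 galaxies_expanded.append((row + rows_expanded * SPACE_EXPANSION, col))
--         else: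
--             rows_expanded += 1
--         row += 1
--
--     return galaxies_expanded
-- ===== SOURCE B (Python) =====
-- SPACE_EXPANSION = 1000000 - 1
--
-- def expand_rows(univ_rows, galaxies):
--     rows = sorted({r for r, _ in galaxies if 0 <= r < univ_rows})
--     return [(r + (r - i) * SPACE_EXPANSION, c)
--             for i, r in enumerate(rows)
--             for rr, c in galaxies if rr == r]
-- ===== Notes on version B (the rewrite author's own statement) =====
-- stated objective: simpler
-- what changed: B drops A's per-row-index while-loop and the defaultdict grouping entirely: it takes the sorted set of occupied in-range rows and emits, for the i-th such row r, every galaxy in that row with offset (r - i) * SPACE_EXPANSION, as one nested comprehension.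
import Mathlib
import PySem

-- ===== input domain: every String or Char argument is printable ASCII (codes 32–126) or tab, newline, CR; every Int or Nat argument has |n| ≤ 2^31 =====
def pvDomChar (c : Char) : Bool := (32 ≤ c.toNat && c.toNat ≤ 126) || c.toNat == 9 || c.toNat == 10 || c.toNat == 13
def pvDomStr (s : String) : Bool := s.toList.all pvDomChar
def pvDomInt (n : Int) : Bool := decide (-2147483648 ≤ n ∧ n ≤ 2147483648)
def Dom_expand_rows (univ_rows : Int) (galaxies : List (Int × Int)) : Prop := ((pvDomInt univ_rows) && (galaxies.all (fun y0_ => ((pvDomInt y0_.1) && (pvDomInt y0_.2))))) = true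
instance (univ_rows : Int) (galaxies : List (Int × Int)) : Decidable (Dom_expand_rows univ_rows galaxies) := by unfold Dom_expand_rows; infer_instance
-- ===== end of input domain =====

-- B drops A's per-row-index while-loop and defaultdict grouping for one nested comprehension over
-- the sorted set of occupied in-range rows, offsetting the i-th row r by (r - i) * SPACE_EXPANSION;
-- objective: simpler.

-- module constant SPACE_EXPANSION = 1000000 - 1 (used by both sources)
def SPACE_EXPANSION : Int := 1000000 - 1

-- ===== PORT A =====
def expand_rows (univ_rows : Int) (galaxies : List (Int × Int)) : List (Int × Int) :=
  -- galaxies_by_row = defaultdict(list); for row, col in galaxies: galaxies_by_row[row].append(col)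
  let galaxies_by_row : PySem.Dict Int (List Int) :=
    galaxies.foldl (fun d p => d.modify p.1 [] fun x => x ++ [p.2]) PySem.Dict.empty
  -- while row < univ_rows, row += 1  ⇒  fold over range(0, univ_rows); state (galaxies_expanded, rows_expanded)
  let st := (PySem.List.pyRange 0 univ_rows).foldl
    (fun (st : List (Int × Int) × Int) row =>
      if galaxies_by_row.contains row then
        ((galaxies_by_row.getD row []).foldl
          (fun acc col => acc ++ [(row + st.2 * SPACE_EXPANSION, col)]) st.1, st.2)
      else (st.1, st.2 + 1)) ([], 0)
  st.1

-- ===== PORT B =====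
def expand_rows_alt (univ_rows : Int) (galaxies : List (Int × Int)) : List (Int × Int) :=
  -- rows = sorted({r for r, _ in galaxies if 0 <= r < univ_rows})
  let rows := PySem.List.sorted
    (PySem.Set.ofList ((galaxies.filter (fun p => decide (0 ≤ p.1 ∧ p.1 < univ_rows))).map Prod.fst))
    (fun x => x)
  -- [(r + (r - i) * SPACE_EXPANSION, c) for i, r in enumerate(rows) for rr, c in galaxies if rr == r]
  (PySem.List.enumerate rows).flatMap (fun ir =>
    (galaxies.filter (fun p => p.1 == ir.2)).map
      (fun p => (ir.2 + (ir.2 - ir.1) * SPACE_EXPANSION, p.2)))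

-- ===== PRECONDITION & SPEC =====
def Spec_expand_rows (univ_rows : Int) (galaxies : List (Int × Int)) (out : List (Int × Int)) : Prop := out = expand_rows_alt univ_rows galaxies
instance (univ_rows : Int) (galaxies : List (Int × Int)) (out : List (Int × Int)) : Decidable (Spec_expand_rows univ_rows galaxies out) := by unfold Spec_expand_rows; infer_instance

-- ===== CLAIM (what is proved, stated in full; the proofs are below) =====
def Claim_equal_expand_rows : Prop := ∀ (univ_rows : Int) (galaxies : List (Int × Int)), Dom_expand_rows univ_rows galaxies → Spec_expand_rows univ_rows galaxies (expand_rows univ_rows galaxies)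

-- ===== LEMMAS AND PROOFS =====

-- A's grouping loop, named for the lemmas below
def grpA (gs : List (Int × Int)) : PySem.Dict Int (List Int) :=
  gs.foldl (fun d p => d.modify p.1 [] fun x => x ++ [p.2]) PySem.Dict.empty

-- A's while-loop body as a named fold
def loopA (d : PySem.Dict Int (List Int)) (rows : List Int) (st : List (Int × Int) × Int) :
    List (Int × Int) × Int :=
  rows.foldl
    (fun (st : List (Int × Int) × Int) row =>
      if d.contains row then
        ((d.getD row []).foldl
          (fun acc col => acc ++ [(row + st.2 * SPACE_EXPANSION, col)]) st.1, st.2)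
      else (st.1, st.2 + 1)) st

-- B's emission for one enumerated row
def emitB (g : List (Int × Int)) (ir : Int × Int) : List (Int × Int) :=
  (g.filter (fun p => p.1 == ir.2)).map (fun p => (ir.2 + (ir.2 - ir.1) * SPACE_EXPANSION, p.2))

-- appending-singleton fold is append-of-map
theorem foldl_app_map (l : List (Int × Int)) (acc : List (Int × Int)) (f : Int × Int → Int × Int) :
    l.foldl (fun a p => a ++ [f p]) acc = acc ++ l.map f := by
  induction l generalizing acc with
  | nil => simp
  | cons x t ih => simp [ih]

-- the distinct occupied rows of [0, n), in increasing order
def occRows (n : Int) (gs : List (Int × Int)) : List Int :=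
  (PySem.List.pyRange 0 n).filter (fun r => decide (r ∈ gs.map Prod.fst))

theorem grp_getD (gs : List (Int × Int)) (r : Int) :
    (grpA gs).getD r [] = (gs.filter (fun p => p.1 == r)).map (fun p => p.2) := by
  simpa [grpA] using PySem.Dict.getD_foldl_modify_append gs PySem.Dict.empty r

theorem grp_keys (gs : List (Int × Int)) :
    (grpA gs).keys = PySem.Set.ofList (gs.map Prod.fst) := by
  simpa [grpA, PySem.Set.update_nil_left] using
    PySem.Dict.keys_foldl_modify_key gs (fun p => p.1) [] (fun _ p => fun x => x ++ [p.2])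
      PySem.Dict.empty

theorem grp_contains (gs : List (Int × Int)) (r : Int) :
    (grpA gs).contains r = decide (r ∈ gs.map Prod.fst) := by
  have h := PySem.Dict.contains_iff_mem_keys (grpA gs) r
  rw [grp_keys, PySem.Set.mem_ofList] at h
  by_cases hm : r ∈ gs.map Prod.fst
  · simp [hm, h.mpr hm]
  · simp only [hm, decide_false]
    rw [Bool.eq_false_iff]
    exact fun hc => hm (h.mp hc)

-- B's sorted set of in-range rows IS occRows
theorem sorted_rows_eq (g : List (Int × Int)) (n : Int) :
    PySem.List.sorted
      (PySem.Set.ofList ((g.filter (fun p => decide (0 ≤ p.1 ∧ p.1 < n))).map Prod.fst))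
      (fun x => x) = occRows n g := by
  unfold occRows
  apply PySem.List.sorted_eq_of_perm_of_pairwise_lt
  · rw [List.perm_ext_iff_of_nodup
      ((PySem.List.nodup_pyRange_one 0 n).filter _)
      (PySem.Set.nodup_ofList _)]
    intro r
    rw [PySem.Set.mem_ofList]
    simp only [List.mem_filter, PySem.List.mem_pyRange_one, List.mem_map,
      List.mem_filter, decide_eq_true_eq]
    constructor
    · rintro ⟨⟨hr0, hrn⟩, ⟨p, hp, hpr⟩⟩
      exact ⟨p, ⟨hp, by omega⟩, hpr⟩
    · rintro ⟨p, ⟨hp, hb⟩, hpr⟩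
      exact ⟨by omega, ⟨p, hp, hpr⟩⟩
  · exact (PySem.List.pairwise_lt_pyRange_one 0 n).filter _

-- bridge invariant: after scanning rows 0..m-1, A's state is B's flatMap over occRows m g
-- together with rows_expanded = m - (number of occupied rows so far)
theorem loop_bridge (g : List (Int × Int)) (m : Nat) :
    loopA (grpA g) (PySem.List.pyRange 0 (m : Int)) ([], 0)
      = ((PySem.List.enumerate (occRows (m : Int) g)).flatMap (emitB g),
         (m : Int) - (occRows (m : Int) g).length) := by
  induction m with
  | zero =>
    have h0 : PySem.List.pyRange 0 ((0 : Nat) : Int) = [] := by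
      rw [PySem.List.pyRange_one]; simp
    rw [h0]
    simp [occRows, loopA]
  | succ m ih =>
    have hcast : (((m + 1 : Nat)) : Int) = (m : Int) + 1 := by push_cast; ring
    rw [hcast]
    rw [PySem.List.pyRange_one_succ_right (by positivity : (0 : Int) ≤ (m : Int))]
    have hocc : occRows ((m : Int) + 1) g
        = occRows (m : Int) g
          ++ (if ((m : Int) ∈ g.map Prod.fst) then [(m : Int)] else []) := by
      rw [occRows, occRows,
        PySem.List.pyRange_one_succ_right (by positivity : (0 : Int) ≤ (m : Int)),
        List.filter_append]
      by_cases h : (m : Int) ∈ g.map Prod.fst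
      · simp [h]
      · simp [h]
    rw [hocc]
    by_cases h : (m : Int) ∈ g.map Prod.fst
    · rw [if_pos h]
      unfold loopA at ih ⊢
      rw [List.foldl_append, ih]
      simp only [List.foldl_cons, List.foldl_nil]
      rw [grp_contains, if_pos (by simp [h])]
      rw [PySem.List.enumerate_append, List.flatMap_append]
      refine Prod.ext ?_ ?_
      · simp only [PySem.List.enumerate_cons, PySem.List.enumerate_nil,
          List.flatMap_cons, List.flatMap_nil, List.append_nil, grp_getD, List.foldl_map]
        rw [foldl_app_map]
        simp [emitB]
      · simp only [List.length_append, List.length_cons, List.length_nil]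
        push_cast
        ring
    · rw [if_neg h]
      unfold loopA at ih ⊢
      rw [List.foldl_append, ih, List.append_nil]
      simp only [List.foldl_cons, List.foldl_nil]
      rw [grp_contains, if_neg (by simp [h])]
      refine Prod.ext rfl ?_
      simp only
      ring

theorem ports_eq (n : Int) (g : List (Int × Int)) :
    expand_rows n g = expand_rows_alt n g := by
  have hB : expand_rows_alt n g
      = (PySem.List.enumerate (occRows n g)).flatMap (emitB g) := by
    unfold expand_rows_alt
    rw [sorted_rows_eq]
    rfl
  have hA : expand_rows n g = (loopA (grpA g) (PySem.List.pyRange 0 n) ([], 0)).1 := rfl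
  rw [hA, hB]
  by_cases hn : 0 ≤ n
  · have hcast : ((n.toNat : Nat) : Int) = n := Int.toNat_of_nonneg hn
    have hb := loop_bridge g n.toNat
    rw [hcast] at hb
    rw [hb]
  · have h1 : PySem.List.pyRange 0 n = [] := by
      rw [PySem.List.pyRange_one]
      simp
      omega
    have h2 : occRows n g = [] := by rw [occRows, h1]; rfl
    rw [h1, h2]
    rfl

-- ===== VERDICT (by name: the statement is the Claim_ definition above) =====
theorem expand_rows_spec : Claim_equal_expand_rows := by
  intro n g _
  show expand_rows n g = expand_rows_alt n g
  exact ports_eq n g
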